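-- pv_equiv track=rewrite | github.com/kwinata/cp | cf-codeforces/320a.py | solve
-- ===== SOURCE A (Python) =====
-- def solve(s):
-- 	cur = "init"
-- 	for c in s:
-- 		if cur == "init":
-- 			if c == "1":
-- 				cur = "one"
-- 			else:
-- 				return "NO"
-- 		elif cur == "one":
-- 			if c == "1":
-- 				cur = "one"
-- 			elif c == "4":
-- 				cur = "oneFour"
-- 			else:
-- 				return "NO"
-- 		elif cur == "oneFour":
-- 			if c == "1":
-- 				cur = "one"
-- 			elif c == "4":
-- 				cur = "oneFourFour"
-- 			else:
-- 				return "NO"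
-- 		elif cur == "oneFourFour":
-- 			if c == "1":
-- 				cur = "one"
-- 			else:
-- 				return "NO"
--
-- 	# if no "NO" was returned while going through, then it's success
-- 	return "YES"
-- ===== SOURCE B (Python) =====
-- def solve(s):
--     if s == "":
--         return "YES"
--     if s[0] == '1' and all(c in "14" for c in s) and "444" not in s:
--         return "YES"
--     return "NO"
-- ===== Notes on version B (the rewrite author's own statement) =====
-- stated objective: simpler
-- what changed: Replaces the four-state finite-state-machine scan with three whole-string checks characterizing (1|14|144)*: first char is '1', alphabet is {'1','4'}, and no "444" substring (empty string accepted).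
import Mathlib
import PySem

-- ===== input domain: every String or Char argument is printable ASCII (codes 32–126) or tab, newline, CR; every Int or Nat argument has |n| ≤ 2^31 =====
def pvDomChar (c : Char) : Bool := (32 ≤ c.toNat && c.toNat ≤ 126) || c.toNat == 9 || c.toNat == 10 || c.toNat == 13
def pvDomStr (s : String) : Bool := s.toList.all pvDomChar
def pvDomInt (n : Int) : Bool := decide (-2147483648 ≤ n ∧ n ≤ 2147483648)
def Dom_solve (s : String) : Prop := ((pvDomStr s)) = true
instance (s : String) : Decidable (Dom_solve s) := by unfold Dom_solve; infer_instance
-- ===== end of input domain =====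

-- B replaces A's four-state machine scan by three whole-string checks (first char '1',
-- alphabet {'1','4'}, no "444" substring): objective 'simpler', same O(n) cost.

-- ===== PORT A =====
-- the for-loop with early 'return "NO"' becomes structural recursion over the chars,
-- with the state 'cur' carried as the same string values A uses
def solveGo (cur : String) (cs : List Char) : String :=
  match cs with
  | [] => "YES"
  | c :: rest =>
    if cur = "init" then
      if c = '1' then solveGo "one" rest else "NO"
    else if cur = "one" then
      if c = '1' then solveGo "one" rest
      else if c = '4' then solveGo "oneFour" rest
      else "NO"
    else if cur = "oneFour" then
      if c = '1' then solveGo "one" rest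
      else if c = '4' then solveGo "oneFourFour" rest
      else "NO"
    else if cur = "oneFourFour" then
      if c = '1' then solveGo "one" rest
      else "NO"
    else solveGo cur rest  -- unreachable fall-through: Python's loop continues with cur unchanged

def solve (s : String) : String := solveGo "init" s.toList

-- ===== PORT B =====
def solve_alt (s : String) : String :=
  match s.toList with
  | [] => "YES"                                   -- s == ""
  | c :: _ =>
    if c = '1'                                    -- s[0] == '1'
        && s.toList.all (fun d => d = '1' || d = '4')  -- all(c in "14" for c in s)
        && !(PySem.Str.isIn "444" s)              -- "444" not in s
    then "YES" else "NO"

-- ===== PRECONDITION & SPEC =====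
def Spec_solve (s : String) (out : String) : Prop := out = solve_alt s
instance (s : String) (out : String) : Decidable (Spec_solve s out) := by unfold Spec_solve; infer_instance

-- ===== CLAIM (what is proved, stated in full; the proofs are below) =====
def Claim_equal_solve : Prop := ∀ (s : String), Dom_solve s → Spec_solve s (solve s)

-- ===== LEMMAS AND PROOFS =====

-- abstract acceptance from state with k more '4's allowed (one→2, oneFour→1, oneFourFour→0)
def okk : Nat → List Char → Bool
  | _, [] => true
  | k, c :: rest =>
    if c = '1' then okk 2 rest
    else if c = '4' then decide (0 < k) && okk (k - 1) rest
    else false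

lemma solveGo_eq_okk (cs : List Char) :
    solveGo "one" cs = (if okk 2 cs then "YES" else "NO") ∧
    solveGo "oneFour" cs = (if okk 1 cs then "YES" else "NO") ∧
    solveGo "oneFourFour" cs = (if okk 0 cs then "YES" else "NO") := by
  induction cs with
  | nil => simp [solveGo, okk]
  | cons c rest ih =>
    refine ⟨?_, ?_, ?_⟩ <;>
      · simp only [solveGo, okk]
        split_ifs <;> simp_all

-- count of leading '4's
def lead4 (cs : List Char) : Nat := (cs.takeWhile (fun c => c = '4')).length

lemma lead4_le_two_of_not_infix {cs : List Char} (h : ¬ ['4','4','4'] <:+: cs) :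
    lead4 cs ≤ 2 := by
  by_contra hgt
  apply h
  have hpre : (cs.takeWhile (fun c => c = '4')).take 3 <+: cs :=
    (List.take_prefix _ _).trans (List.takeWhile_prefix _)
  have hlen : ((cs.takeWhile (fun c => c = '4')).take 3).length = 3 := by
    rw [List.length_take]
    unfold lead4 at hgt; omega
  obtain ⟨a, b, c, habc⟩ := List.length_eq_three.mp hlen
  have hall : ∀ d ∈ (cs.takeWhile (fun c => c = '4')).take 3, d = '4' := by
    intro d hd
    have := List.mem_takeWhile_imp (List.mem_of_mem_take hd)
    simpa using this
  have ha : a = '4' := hall a (by simp [habc])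
  have hb : b = '4' := hall b (by simp [habc])
  have hc : c = '4' := hall c (by simp [habc])
  rw [habc, ha, hb, hc] at hpre
  exact hpre.isInfix

lemma lead4_ge_two {rest : List Char} (h : ['4','4'] <+: rest) : 2 ≤ lead4 rest := by
  obtain ⟨t, ht⟩ := h
  subst ht
  simp [lead4, List.takeWhile]

lemma okk_iff (cs : List Char) (k : Nat) (hk : k ≤ 2) :
    okk k cs = true ↔
      ((∀ c ∈ cs, c = '1' ∨ c = '4') ∧ lead4 cs ≤ k ∧ ¬ ['4','4','4'] <:+: cs) := by
  induction cs generalizing k with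
  | nil => simp [okk, lead4]
  | cons c rest ih =>
    by_cases h1 : c = '1'
    · subst h1
      have hnp : ¬ (['4','4','4'] <+: ('1' :: rest)) := by
        intro ⟨t, ht⟩; simp at ht
      rw [show okk k ('1' :: rest) = okk 2 rest from by simp [okk],
          ih 2 (by omega)]
      constructor
      · rintro ⟨ha, -, hni⟩
        refine ⟨?_, ?_, ?_⟩
        · intro d hd
          rcases List.mem_cons.mp hd with hd | hd
          · exact Or.inl hd
          · exact ha d hd
        · simp [lead4, List.takeWhile]
        · intro hi
          rcases List.infix_cons_iff.mp hi with hp | hi'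
          · exact hnp hp
          · exact hni hi'
      · rintro ⟨ha, -, hni⟩
        have hni' : ¬ ['4','4','4'] <:+: rest := fun h =>
          hni (h.trans (List.suffix_cons '1' rest).isInfix)
        exact ⟨fun d hd => ha d (List.mem_cons_of_mem _ hd),
               lead4_le_two_of_not_infix hni', hni'⟩
    · by_cases h4 : c = '4'
      · subst h4
        rw [show okk k ('4' :: rest) = (decide (0 < k) && okk (k - 1) rest) from by
              simp [okk]]
        constructor
        · intro h
          rw [Bool.and_eq_true, decide_eq_true_eq] at h
          obtain ⟨hk0, hok⟩ := h
          obtain ⟨ha, hl, hni⟩ := (ih (k - 1) (by omega)).mp hok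
          refine ⟨?_, ?_, ?_⟩
          · intro d hd
            rcases List.mem_cons.mp hd with hd | hd
            · exact Or.inr hd
            · exact ha d hd
          · have : lead4 ('4' :: rest) = lead4 rest + 1 := by
              simp [lead4, List.takeWhile]
            omega
          · intro hi
            rcases List.infix_cons_iff.mp hi with hp | hi'
            · obtain ⟨t, ht⟩ := hp
              have h2 : ['4','4'] <+: rest := ⟨t, by simpa using ht⟩
              have := lead4_ge_two h2
              omega
            · exact hni hi'
        · rintro ⟨ha, hl, hni⟩
          have hlr : lead4 ('4' :: rest) = lead4 rest + 1 := by
            simp [lead4, List.takeWhile]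
          have hni' : ¬ ['4','4','4'] <:+: rest := fun h =>
            hni (h.trans (List.suffix_cons '4' rest).isInfix)
          rw [Bool.and_eq_true, decide_eq_true_eq]
          refine ⟨by omega, (ih (k - 1) (by omega)).mpr
            ⟨fun d hd => ha d (List.mem_cons_of_mem _ hd), by omega, hni'⟩⟩
      · constructor
        · intro h
          simp only [okk, if_neg h1, if_neg h4] at h
          exact absurd h (by simp)
        · rintro ⟨ha, -, -⟩
          rcases ha c (List.mem_cons_self) with h | h
          · exact absurd h h1
          · exact absurd h h4

lemma all14_iff (cs : List Char) :
    (cs.all (fun d => d = '1' || d = '4') = true) ↔ ∀ c ∈ cs, c = '1' ∨ c = '4' := by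
  simp [List.all_eq_true]

theorem solve_eq (s : String) : solve s = solve_alt s := by
  unfold solve solve_alt
  cases hs : s.toList with
  | nil => simp [solveGo]
  | cons c rest =>
    by_cases h1 : c = '1'
    · subst h1
      rw [show solveGo "init" ('1' :: rest) = solveGo "one" rest from by simp [solveGo],
          (solveGo_eq_okk rest).1]
      have hIn : (PySem.Str.isIn "444" s = false) ↔ ¬ ['4','4','4'] <:+: ('1' :: rest) := by
        rw [← Bool.not_eq_true, PySem.Str.isIn_iff_infix,
            show "444".toList = ['4','4','4'] from by decide, hs]
      have hiff : (okk 2 rest = true) ↔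
          ((decide (('1' : Char) = '1')
              && ('1' :: rest).all (fun d => decide (d = '1') || decide (d = '4'))
            && !(PySem.Str.isIn "444" s)) = true) := by
        rw [okk_iff rest 2 (by omega)]
        simp only [Bool.and_eq_true, Bool.not_eq_true', decide_true, true_and]
        rw [hIn, all14_iff]
        constructor
        · rintro ⟨ha, -, hni⟩
          refine ⟨?_, ?_⟩
          · intro d hd
            rcases List.mem_cons.mp hd with hd | hd
            · exact Or.inl hd
            · exact ha d hd
          · intro hi
            rcases List.infix_cons_iff.mp hi with hp | hi'
            · obtain ⟨t, ht⟩ := hp; simp at ht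
            · exact hni hi'
        · rintro ⟨ha, hni⟩
          have hni' : ¬ ['4','4','4'] <:+: rest := fun h =>
            hni (h.trans (List.suffix_cons '1' rest).isInfix)
          exact ⟨fun d hd => ha d (List.mem_cons_of_mem _ hd),
                 lead4_le_two_of_not_infix hni', hni'⟩
      have hb : okk 2 rest =
          (decide (('1' : Char) = '1')
              && ('1' :: rest).all (fun d => decide (d = '1') || decide (d = '4'))
            && !(PySem.Str.isIn "444" s)) := by
        cases h : okk 2 rest with
        | false =>
          cases hX : (decide (('1' : Char) = '1')
              && ('1' :: rest).all (fun d => decide (d = '1') || decide (d = '4'))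
            && !(PySem.Str.isIn "444" s)) with
          | false => rfl
          | true => exact absurd (hiff.mpr hX) (by simp [h])
        | true => exact (hiff.mp h).symm
      rw [hb]
    · simp [solveGo, h1]

-- ===== VERDICT (by name: the statement is the Claim_ definition above) =====
theorem solve_spec : Claim_equal_solve := by
  intro s _
  unfold Spec_solve
  exact solve_eq s
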